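-- pv_equiv track=rewrite | github.com/today-algo-done/2023-js-algorithm-study-sangmin | KakaoCodingTest/ReportResult.py | solution
-- ===== SOURCE A (Python) =====
-- from collections import defaultdict
--
-- def solution(id_list, report, k):
--     recv2cnt = defaultdict(int)  # 신고받은 횟수
--
--     # 신고 한사람 에서 신고받은 사람 저장(중복은 허용X 정지당한 유저의 횟수 만 저장하기 때문에 데이터 타입은 set으로 저장)
--     send2recv = defaultdict(set)
--
--     # report 를 돌면서 각각의 변수를 업데이트를 함
--     for r in report:
--         # 신고를 한사람과 받은 사람을 띄어쓰기로 구분이 되어있기 때문에 split(' ')로 구분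
--         send, recv = r.split(' ')
--         if recv in send2recv[send]:  # 중복을 허용하지 않기 때문에 구분해줌
--             continue  # 이미 신고한 유저라면 지나가고
--         send2recv[send].add(recv)  # 처음 신고한 유저라면 신고한유저 목록에 업데이트
--         recv2cnt[recv] += 1  # 신고를 당한 횟수 추가 해줌
--
--     answer = []
--     for send in id_list:  # 주어진 유저의 순서대로 리턴을 해주어야 하기 때문에
--         # 신고한사람을 확인해서 그 수를 모두 더해준다.
--         stop_cnt = sum([recv2cnt[recv] >= k for recv in send2recv[send]])
--         # 신고 를 당한 횟수 = 신고한 사람들의 수  를 모두 answer 에 업데이트 해준다.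
--         answer.append(stop_cnt)
--     return answer
-- ===== SOURCE B (Python) =====
-- from collections import Counter
--
-- def solution(id_list, report, k):
--     # dedupe reports into (sender, target) pairs, first occurrence order
--     pairs = list(dict.fromkeys(tuple(r.split(' ')) for r in report))
--     cnt = Counter(recv for _, recv in pairs)
--     result = dict.fromkeys(id_list, 0)
--     for send, recv in pairs:
--         if cnt[recv] >= k and send in result:
--             result[send] += 1
--     return [result[i] for i in id_list]
-- ===== Notes on version B (the rewrite author's own statement) =====
-- stated objective: alternative
-- what changed: A gathers per-user results by building a dict send->set-of-targets plus a target->count dict and summing (count>=k) over each user's target set; B flattens to a deduped (sender,target) pair list, counts per target once, and scatters one credit per qualifying pair to its sender in a zero-initialized result dict.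
import Mathlib
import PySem

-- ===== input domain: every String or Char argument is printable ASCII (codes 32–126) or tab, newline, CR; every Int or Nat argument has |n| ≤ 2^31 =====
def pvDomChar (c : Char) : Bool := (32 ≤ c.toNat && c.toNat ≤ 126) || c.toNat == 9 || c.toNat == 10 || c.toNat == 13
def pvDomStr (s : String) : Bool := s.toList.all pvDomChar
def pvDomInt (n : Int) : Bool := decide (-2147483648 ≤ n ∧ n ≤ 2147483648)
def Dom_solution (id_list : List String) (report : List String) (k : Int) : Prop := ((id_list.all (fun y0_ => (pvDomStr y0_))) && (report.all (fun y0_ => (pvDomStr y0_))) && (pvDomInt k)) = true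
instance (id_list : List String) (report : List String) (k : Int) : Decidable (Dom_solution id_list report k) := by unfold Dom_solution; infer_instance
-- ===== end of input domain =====

-- B re-decomposes A (per-id gather over a dict of sets) into dedupe-count-scatter over a flat pair list; alternative decomposition, not claimed faster.

-- ===== PORT A =====
-- A gathers: dict send→set of targets plus dict target→count, then per id sums (count ≥ k) over its target set
-- (the sum over the Python set is order-independent, so the Set's insertion order is safe to consume).
def solution (id_list : List String) (report : List String) (k : Int) : List Int :=
  let st := report.foldl
    (fun (st : PySem.Dict String Int × PySem.Dict String (PySem.Set String)) r =>
      match PySem.Str.split? r " " with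
      | some [send, recv] =>
        let s := st.2.getD send []
        if PySem.Set.contains s recv then st
        else (st.1.modify recv 0 (· + 1), st.2.insert send (PySem.Set.add s recv))
      | _ => st)  -- Python raises ValueError here (unpack ≠ 2 parts); excluded by Pre_solution
    (PySem.Dict.empty, PySem.Dict.empty)
  id_list.map (fun send =>
    ((st.2.getD send []).map (fun recv => if st.1.getD recv 0 ≥ k then (1 : Int) else 0)).sum)

-- ===== PORT B =====
def pvParsePair (r : String) : String × String :=
  let parts := (PySem.Str.split? r " ").getD []
  (parts.getD 0 "", parts.getD 1 "")  -- Python raises ValueError when parts ≠ 2; those inputs are excluded by Pre_solution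

-- B scatters: dedupe reports to pairs, count per target, credit each qualifying pair to its sender.
def solution_alt (id_list : List String) (report : List String) (k : Int) : List Int :=
  let pairs := PySem.List.dedup (report.map pvParsePair)
  let cnt : PySem.Dict String Int := PySem.Dict.counter (pairs.map (·.2))
  let init : PySem.Dict String Int := id_list.foldl (fun d i => d.insert i 0) PySem.Dict.empty
  let result := pairs.foldl
    (fun d p => if cnt.getD p.2 0 ≥ k && d.contains p.1 then d.modify p.1 0 (· + 1) else d) init
  id_list.map (fun i => result.getD i 0)

-- ===== PRECONDITION & SPEC =====
-- Pre_: every report entry splits on ' ' into exactly two parts; otherwise Python's 'send, recv = r.split(' ')' raises ValueError.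
def Pre_solution (_id_list : List String) (report : List String) (_k : Int) : Prop :=
  report.all (fun r => ((PySem.Str.split? r " ").getD []).length == 2) = true
instance (id_list : List String) (report : List String) (k : Int) : Decidable (Pre_solution id_list report k) := by unfold Pre_solution; infer_instance
def pvWitness_solution : List String × List String × Int := (["muzi", "frodo"], ["muzi frodo", "muzi frodo"], 1)

def Spec_solution (id_list : List String) (report : List String) (k : Int) (out : List Int) : Prop := out = solution_alt id_list report k
instance (id_list : List String) (report : List String) (k : Int) (out : List Int) : Decidable (Spec_solution id_list report k out) := by unfold Spec_solution; infer_instance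

-- ===== CLAIM (what is proved, stated in full; the proofs are below) =====
def Claim_equal_solution : Prop := ∀ (id_list : List String) (report : List String) (k : Int), Dom_solution id_list report k → Pre_solution id_list report k → Spec_solution id_list report k (solution id_list report k)

-- ===== LEMMAS AND PROOFS =====

-- A's loop step, rephrased on already-parsed pairs
def pvStepA (st : PySem.Dict String Int × PySem.Dict String (PySem.Set String))
    (p : String × String) : PySem.Dict String Int × PySem.Dict String (PySem.Set String) :=
  let s := st.2.getD p.1 []
  if PySem.Set.contains s p.2 then st
  else (st.1.modify p.2 0 (· + 1), st.2.insert p.1 (PySem.Set.add s p.2))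

-- the canonical state determined by the deduped pair list acc
def pvAState (acc : List (String × String)) :
    PySem.Dict String Int × PySem.Dict String (PySem.Set String) :=
  (PySem.Dict.counter (acc.map (·.2)),
   acc.foldl (fun d p => d.modify p.1 [] (· ++ [p.2])) PySem.Dict.empty)

lemma pvAState_snd_getD (acc : List (String × String)) (s : String) :
    (pvAState acc).2.getD s [] = (acc.filter (fun p => p.1 == s)).map (·.2) := by
  simpa [pvAState] using PySem.Dict.getD_foldl_modify_append acc PySem.Dict.empty s

lemma pvMem_snd (acc : List (String × String)) (p : String × String) :
    PySem.Set.contains ((pvAState acc).2.getD p.1 []) p.2 = true ↔ p ∈ acc := by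
  rw [PySem.Set.contains_iff, pvAState_snd_getD]
  simp only [List.mem_map, List.mem_filter]
  constructor
  · rintro ⟨q, ⟨hq, he⟩, h2⟩
    have : q = p := by
      cases p; cases q
      simp at he h2 ⊢
      exact ⟨he, h2⟩
    exact this ▸ hq
  · intro hp
    exact ⟨p, ⟨hp, by simp⟩, rfl⟩

lemma pvStepA_eq (acc : List (String × String)) (p : String × String) :
    pvStepA (pvAState acc) p = pvAState (PySem.Set.add acc p) := by
  by_cases hp : p ∈ acc
  · have hc := (pvMem_snd acc p).2 hp
    rw [PySem.Set.add_of_mem hp]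
    simp only [pvStepA, hc, if_true]
  · have hc : PySem.Set.contains ((pvAState acc).2.getD p.1 []) p.2 = false :=
      Bool.eq_false_iff.mpr (fun h => hp ((pvMem_snd acc p).1 h))
    rw [PySem.Set.add_of_not_mem hp]
    simp only [pvStepA, hc, Bool.false_eq_true, if_false]
    refine Prod.ext ?_ ?_
    · show (pvAState acc).1.modify p.2 0 (· + 1) = (pvAState (acc ++ [p])).1
      simp [pvAState, PySem.Dict.counter_append_singleton]
    · show (pvAState acc).2.insert p.1 (PySem.Set.add ((pvAState acc).2.getD p.1 []) p.2) = (pvAState (acc ++ [p])).2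
      have hnm : p.2 ∉ (pvAState acc).2.getD p.1 [] := by
        intro hm
        exact hp ((pvMem_snd acc p).1 ((PySem.Set.contains_iff _ _).2 hm))
      rw [PySem.Set.add_of_not_mem hnm]
      simp only [pvAState, List.foldl_append, List.foldl_cons, List.foldl_nil]
      -- modify p.1 [] (· ++ [p.2]) = insert p.1 (getD p.1 [] ++ [p.2])
      rfl

lemma pvLoopA (ps : List (String × String)) (acc : List (String × String)) :
    ps.foldl pvStepA (pvAState acc) = pvAState (ps.foldl PySem.Set.add acc) := by
  induction ps generalizing acc with
  | nil => rfl
  | cons p ps ih => simp [List.foldl_cons, pvStepA_eq, ih]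

-- under Pre_, A's raw loop over report is pvStepA over the parsed pairs
lemma pvFoldA_eq (report : List String)
    (hp : ∀ r ∈ report, ((PySem.Str.split? r " ").getD []).length = 2)
    (st : PySem.Dict String Int × PySem.Dict String (PySem.Set String)) :
    report.foldl
      (fun st r =>
        match PySem.Str.split? r " " with
        | some [send, recv] =>
          let s := st.2.getD send []
          if PySem.Set.contains s recv then st
          else (st.1.modify recv 0 (· + 1), st.2.insert send (PySem.Set.add s recv))
        | _ => st) st
    = (report.map pvParsePair).foldl pvStepA st := by
  induction report generalizing st with
  | nil => rfl
  | cons r rs ih =>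
    have hr := hp r (List.mem_cons_self ..)
    have hrs : ∀ x ∈ rs, ((PySem.Str.split? x " ").getD []).length = 2 :=
      fun x hx => hp x (List.mem_cons_of_mem _ hx)
    simp only [List.map_cons, List.foldl_cons]
    rw [← ih hrs]
    congr 1
    cases hs : PySem.Str.split? r " " with
    | none => simp [hs] at hr
    | some parts =>
      match parts, hr with
      | [a, b], _ => simp [hs, pvParsePair, pvStepA]

      | [], hr => simp [hs] at hr
      | [a], hr => simp [hs] at hr
      | a :: b :: c :: t, hr => simp [hs] at hr

-- zero-initialisation facts for B's result dict
lemma pvInit_getD (l : List String) (d : PySem.Dict String Int)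
    (h : ∀ j, d.getD j 0 = 0) (j : String) :
    (l.foldl (fun d i => d.insert i 0) d).getD j 0 = 0 := by
  induction l generalizing d with
  | nil => exact h j
  | cons i l ih =>
    refine ih _ (fun j' => ?_)
    rw [PySem.Dict.getD_insert]
    split <;> simp [h]

lemma pvInit_contains_gen (l : List String) (d : PySem.Dict String Int) (j : String) :
    (l.foldl (fun d i => d.insert i 0) d).contains j = (decide (j ∈ l) || d.contains j) := by
  induction l generalizing d with
  | nil => simp
  | cons i l ih =>
    rw [List.foldl_cons, ih, PySem.Dict.contains_insert]
    by_cases h : j = i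
    · simp [h]
    · have hb : (j == i) = false := by simp [h]
      simp [hb, h]

lemma pvInit_contains (l : List String) (j : String) :
    (l.foldl (fun d i => d.insert i 0) (PySem.Dict.empty : PySem.Dict String Int)).contains j = decide (j ∈ l) := by
  rw [pvInit_contains_gen l PySem.Dict.empty j]
  simp

-- a sum of (1 if p x else 0) over a list is its countP
lemma pvSumIte {α : Type} (l : List α) (p : α → Prop) [DecidablePred p] :
    (l.map (fun x => if p x then (1 : Int) else 0)).sum = (l.countP (fun x => decide (p x)) : Int) := by
  induction l with
  | nil => simp
  | cons x l ih =>
    simp only [List.map_cons, List.sum_cons, List.countP_cons, ih]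
    by_cases h : p x
    · simp only [if_pos h, decide_eq_true_eq.mpr h]
      push_cast
      ring
    · simp [h]

-- B's scatter loop counts qualifying pairs per sender in id_list
lemma pvScatter (cnt : PySem.Dict String Int) (k : Int) (id_list : List String)
    (ps : List (String × String)) (d : PySem.Dict String Int)
    (H : ∀ j, d.contains j = decide (j ∈ id_list)) (j : String) (hj : j ∈ id_list) :
    (ps.foldl (fun d p => if cnt.getD p.2 0 ≥ k && d.contains p.1 then d.modify p.1 0 (· + 1) else d) d).getD j 0
      = d.getD j 0 + (ps.countP (fun q => q.1 == j && decide (k ≤ cnt.getD q.2 0)) : Int) := by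
  induction ps generalizing d with
  | nil => simp
  | cons p ps ih =>
    simp only [List.foldl_cons, List.countP_cons]
    by_cases hcond : k ≤ cnt.getD p.2 0
    · by_cases hmem : p.1 ∈ id_list
      · have hg : (cnt.getD p.2 0 ≥ k && d.contains p.1) = true := by
          simp [H, hcond, hmem, ge_iff_le]
        have H' : ∀ j', (d.modify p.1 0 (· + 1)).contains j' = decide (j' ∈ id_list) := by
          intro j'
          rw [PySem.Dict.contains_modify]
          by_cases h : j' = p.1 <;> simp [h, hmem, H]
        rw [if_pos hg, ih _ H', PySem.Dict.getD_modify]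
        by_cases hjp : j = p.1
        · subst hjp
          simp only [beq_self_eq_true, Bool.true_and, hcond, decide_true, if_pos]
          push_cast
          ring
        · have hb : (p.1 == j) = false := by
            simp only [beq_eq_false_iff_ne, ne_eq]
            exact fun h => hjp h.symm
          simp only [if_neg hjp, hb, Bool.false_and, Bool.false_eq_true, if_false]
          push_cast
          ring
      · have hg : ¬ ((cnt.getD p.2 0 ≥ k && d.contains p.1) = true) := by
          simp [H, hmem]
        have hb : (p.1 == j) = false := by
          simp only [beq_eq_false_iff_ne, ne_eq]
          exact fun h => hmem (h ▸ hj)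
        rw [if_neg hg, ih _ H]
        simp [hb]
    · have hg : ¬ ((cnt.getD p.2 0 ≥ k && d.contains p.1) = true) := by
        simp [ge_iff_le, hcond]
      rw [if_neg hg, ih _ H]
      simp [hcond]

-- ===== VERDICT (by name: the statement is the Claim_ definition above) =====
theorem solution_spec : Claim_equal_solution := by
  intro id_list report k _ hpre
  unfold Spec_solution solution solution_alt
  have hp : ∀ r ∈ report, ((PySem.Str.split? r " ").getD []).length = 2 := by
    intro r hr
    unfold Pre_solution at hpre
    rw [List.all_eq_true] at hpre
    simpa using hpre r hr
  rw [pvFoldA_eq report hp]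
  have h0 : (PySem.Dict.empty, PySem.Dict.empty) = pvAState [] := rfl
  rw [h0, pvLoopA]
  set pairs := PySem.List.dedup (report.map pvParsePair) with hpairs
  have hfold : (report.map pvParsePair).foldl PySem.Set.add [] = pairs := by
    rw [hpairs, PySem.List.dedup_eq_ofList, PySem.Set.ofList_eq_foldl]
  rw [hfold]
  set cnt := PySem.Dict.counter (pairs.map (·.2)) with hcnt
  apply List.map_congr_left
  intro send hsend
  -- A side: sum of 0/1 over send's target set = countP over pairs
  have hA : (((pvAState pairs).2.getD send []).map
        (fun recv => if (pvAState pairs).1.getD recv 0 ≥ k then (1 : Int) else 0)).sum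
      = (pairs.countP (fun q => q.1 == send && decide (k ≤ cnt.getD q.2 0)) : Int) := by
    rw [pvAState_snd_getD]
    have : (pvAState pairs).1 = cnt := rfl
    rw [this, pvSumIte, List.countP_map, List.countP_filter]
    congr 1
    apply List.countP_congr
    intro q _
    simp [Function.comp, ge_iff_le, Bool.and_comm]
  rw [hA]
  -- B side
  rw [pvScatter cnt k id_list pairs _ (fun j => pvInit_contains id_list j) send hsend]
  rw [pvInit_getD id_list PySem.Dict.empty (fun j => by simp) send]
  ring
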